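-- pv_equiv track=rewrite | github.com/hoikuict/open-hoikuict | calendar_service.py | split_csv_weekdays
-- ===== SOURCE A (Python) =====
-- WEEKDAY_MAP = {
--     "MO": 0,
--     "TU": 1,
--     "WE": 2,
--     "TH": 3,
--     "FR": 4,
--     "SA": 5,
--     "SU": 6,
-- }
--
-- def split_csv_weekdays(value: str | None) -> list[int]:
--     if not value:
--         return []
--     result: list[int] = []
--     for item in value.split(","):
--         token = item.strip().upper()
--         if token in WEEKDAY_MAP:
--             result.append(WEEKDAY_MAP[token])
--     return sorted(set(result))
-- ===== SOURCE B (Python) =====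
-- WEEKDAY_KEYS = ["MO", "TU", "WE", "TH", "FR", "SA", "SU"]
--
-- def split_csv_weekdays(value):
--     if not value:
--         return []
--     tokens = {item.strip().upper() for item in value.split(",")}
--     return [d for d in range(7) if WEEKDAY_KEYS[d] in tokens]
-- ===== Notes on version B (the rewrite author's own statement) =====
-- stated objective: simpler
-- what changed: Instead of scanning the input tokens, looking each up in the dict, and then deduplicating and sorting with sorted(set(...)), B builds the normalized token set once and scans the fixed day indices 0..6, emitting d when its two-letter key is in the token set, so the output is already unique and sorted and the dict lookup and the sorted(set(...)) pass disappear.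
import Mathlib
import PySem

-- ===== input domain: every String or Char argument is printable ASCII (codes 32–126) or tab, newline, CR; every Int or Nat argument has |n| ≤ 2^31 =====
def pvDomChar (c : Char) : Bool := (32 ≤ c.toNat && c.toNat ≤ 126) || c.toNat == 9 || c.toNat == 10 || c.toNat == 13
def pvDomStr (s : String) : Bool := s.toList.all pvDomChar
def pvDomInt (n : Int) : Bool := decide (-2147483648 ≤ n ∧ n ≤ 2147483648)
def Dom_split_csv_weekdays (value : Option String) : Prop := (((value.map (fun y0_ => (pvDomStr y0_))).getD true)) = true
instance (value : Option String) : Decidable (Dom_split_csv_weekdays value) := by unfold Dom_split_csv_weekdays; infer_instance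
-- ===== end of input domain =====

-- B builds the normalized token set once and scans the fixed day indices 0..6 (emitting d when
-- its key is in the token set), so A's dict lookup and sorted(set(...)) pass disappear; simpler.

-- ===== PORT A =====
def WEEKDAY_MAP : PySem.Dict String Int :=
  PySem.Dict.ofList [("MO", 0), ("TU", 1), ("WE", 2), ("TH", 3), ("FR", 4), ("SA", 5), ("SU", 6)]

-- sep "," is nonempty, so split? never returns none; .getD [] only discharges the option.
def split_csv_weekdays (value : Option String) : List Int :=
  match value with
  | none => []
  | some s =>
    if s = "" then []
    else
      let result : List Int :=
        ((PySem.Str.split? s ",").getD []).foldl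
          (fun acc item =>
            let token := PySem.Str.upper (PySem.Str.strip item)
            if WEEKDAY_MAP.contains token then acc ++ [WEEKDAY_MAP.getD token 0] else acc) []
      PySem.List.sorted (PySem.Set.ofList result) (fun x => x) false

-- ===== PORT B =====
def WEEKDAY_KEYS : List String := ["MO", "TU", "WE", "TH", "FR", "SA", "SU"]

-- WEEKDAY_KEYS[d] for d in range(7) is always in range, so .getD "" only discharges the option.
def split_csv_weekdays_alt (value : Option String) : List Int :=
  match value with
  | none => []
  | some s =>
    if s = "" then []
    else
      let tokens : PySem.Set String :=
        PySem.Set.ofList (((PySem.Str.split? s ",").getD []).map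
          (fun item => PySem.Str.upper (PySem.Str.strip item)))
      (PySem.List.pyRange 0 7 1).filter
        (fun d => PySem.Set.contains tokens ((PySem.List.pyGet? WEEKDAY_KEYS d).getD ""))

-- ===== PRECONDITION & SPEC =====
def Spec_split_csv_weekdays (value : Option String) (out : List Int) : Prop := out = split_csv_weekdays_alt value
instance (value : Option String) (out : List Int) : Decidable (Spec_split_csv_weekdays value out) := by unfold Spec_split_csv_weekdays; infer_instance

-- ===== CLAIM (what is proved, stated in full; the proofs are below) =====
def Claim_equal_split_csv_weekdays : Prop := ∀ (value : Option String), Dom_split_csv_weekdays value → Spec_split_csv_weekdays value (split_csv_weekdays value)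

-- ===== LEMMAS AND PROOFS =====

theorem pyRange7 : PySem.List.pyRange 0 7 1 = [0, 1, 2, 3, 4, 5, 6] := by decide

-- lookup in the literal 7-entry map, as a disjunction
theorem WEEKDAY_MAP_get?_iff (t : String) (a : Int) : WEEKDAY_MAP.get? t = some a ↔
      (t = "MO" ∧ a = 0) ∨ (t = "TU" ∧ a = 1) ∨ (t = "WE" ∧ a = 2) ∨ (t = "TH" ∧ a = 3) ∨
      (t = "FR" ∧ a = 4) ∨ (t = "SA" ∧ a = 5) ∨ (t = "SU" ∧ a = 6) := by
  have : WEEKDAY_MAP =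
      PySem.Dict.mk [("MO", 0), ("TU", 1), ("WE", 2), ("TH", 3), ("FR", 4), ("SA", 5), ("SU", 6)] := by
    decide
  rw [this]
  simp only [PySem.Dict.get?_mk_cons, beq_iff_eq]
  split_ifs <;> simp_all [PySem.Dict.get?, eq_comm]

-- A's loop, over any item list: normalize, look up, collect the successful lookups.
theorem foldl_lookup_eq_filterMap (l : List String) (acc : List Int) :
    l.foldl (fun acc item =>
        let token := PySem.Str.upper (PySem.Str.strip item)
        if WEEKDAY_MAP.contains token then acc ++ [WEEKDAY_MAP.getD token 0] else acc) acc
      = acc ++ (l.map (fun item => PySem.Str.upper (PySem.Str.strip item))).filterMap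
          WEEKDAY_MAP.get? := by
  induction l generalizing acc with
  | nil => simp
  | cons t l ih =>
    simp only [List.foldl_cons, List.map_cons, List.filterMap_cons, ih]
    rw [PySem.Dict.contains_eq_isSome_get?, PySem.Dict.getD_eq_get?_getD]
    cases h : WEEKDAY_MAP.get? (PySem.Str.upper (PySem.Str.strip t)) with
    | none => simp only [Option.isSome_none, Bool.false_eq_true, if_false]
    | some v => simp only [Option.isSome_some, if_true, Option.getD_some, List.append_assoc,
        List.singleton_append]

-- both result lists hold the same set of days
theorem mem_iff (toks : List String) (a : Int) :
    a ∈ PySem.Set.ofList (toks.filterMap WEEKDAY_MAP.get?) ↔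
    a ∈ ([0, 1, 2, 3, 4, 5, 6] : List Int).filter
        (fun d => PySem.Set.contains (PySem.Set.ofList toks)
          ((PySem.List.pyGet? WEEKDAY_KEYS d).getD "")) := by
  simp only [PySem.Set.mem_ofList, List.mem_filterMap, WEEKDAY_MAP_get?_iff, List.mem_filter,
    PySem.Set.contains_eq_listContains, List.mem_cons, List.not_mem_nil, or_false]
  constructor
  · rintro ⟨t, ht, h⟩
    rcases h with ⟨rfl, rfl⟩|⟨rfl, rfl⟩|⟨rfl, rfl⟩|⟨rfl, rfl⟩|⟨rfl, rfl⟩|⟨rfl, rfl⟩|⟨rfl, rfl⟩ <;>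
      refine ⟨by simp, by simpa [WEEKDAY_KEYS, PySem.List.pyGet?, PySem.List.pyIdx?] using ht⟩
  · rintro ⟨hmem, hk⟩
    rcases hmem with rfl|rfl|rfl|rfl|rfl|rfl|rfl <;>
      exact ⟨_, by simpa [WEEKDAY_KEYS, PySem.List.pyGet?, PySem.List.pyIdx?] using hk, by simp⟩

-- the central fact: sorted(set(lookups along toks)) = range(7) filtered by the token set
theorem key_lemma (toks : List String) :
    PySem.List.sorted (PySem.Set.ofList (toks.filterMap WEEKDAY_MAP.get?)) (fun x => x) false
      = ([0, 1, 2, 3, 4, 5, 6] : List Int).filter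
          (fun d => PySem.Set.contains (PySem.Set.ofList toks)
            ((PySem.List.pyGet? WEEKDAY_KEYS d).getD "")) := by
  apply PySem.List.sorted_eq_of_perm_of_pairwise_lt
  · rw [List.perm_ext_iff_of_nodup]
    · exact fun a => (mem_iff toks a).symm
    · exact List.Nodup.filter _ (by decide)
    · exact PySem.Set.nodup_ofList _
  · exact List.Pairwise.filter _ (by decide)

-- ===== VERDICT (by name: the statement is the Claim_ definition above) =====
theorem split_csv_weekdays_spec : Claim_equal_split_csv_weekdays := by
  intro value _
  unfold Spec_split_csv_weekdays
  cases value with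
  | none => rfl
  | some s =>
    by_cases hs : s = ""
    · simp [split_csv_weekdays, split_csv_weekdays_alt, hs]
    · simp only [split_csv_weekdays, split_csv_weekdays_alt, if_neg hs, pyRange7]
      rw [foldl_lookup_eq_filterMap, List.nil_append, key_lemma]
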